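-- pv_equiv track=rewrite | github.com/Vijay-123456-beep/Domain_Research | backend/subplot_splitter.py | _get_continuous_regions
-- ===== SOURCE A (Python) =====
-- def _get_continuous_regions(proj, gap_threshold=10, noise_thresh=0):
--     regions = []
--     start = None
--     gap_count = 0
--
--     for i, val in enumerate(proj):
--         if val > noise_thresh:
--             if start is None:
--                 start = i
--             gap_count = 0
--         else:
--             if start is not None:
--                 gap_count += 1
--                 if gap_count > gap_threshold:
--                     regions.append((start, i - gap_count))
--                     start = None
--                     gap_count = 0
--     if start is not None:
--         regions.append((start, len(proj)))
--     return regions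
-- ===== SOURCE B (Python) =====
-- def _get_continuous_regions(proj, gap_threshold=10, noise_thresh=0):
--     n = len(proj)
--     # Pass 1: collapse proj into maximal runs of equal signal/noise status.
--     runs = []  # (is_signal, run_length)
--     i = 0
--     while i < n:
--         sig = proj[i] > noise_thresh
--         j = i + 1
--         while j < n and (proj[j] > noise_thresh) == sig:
--             j += 1
--         runs.append((sig, j - i))
--         i = j
--     # Pass 2: walk the runs.
--     regions = []
--     start = None
--     last = 0
--     i = 0
--     for sig, length in runs:
--         if sig:
--             if start is None:
--                 start = i
--             last = i + length - 1
--         elif start is not None and length > gap_threshold: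
--             regions.append((start, last))
--             start = None
--         i += length
--     if start is not None:
--         regions.append((start, n))
--     return regions
-- ===== Notes on version B (the rewrite author's own statement) =====
-- stated objective: alternative
-- what changed: A's flat per-element state machine (start/gap_count flags updated at every element) is replaced by a two-pass decomposition: first collapse proj into maximal runs of equal signal/noise status, then walk the runs, closing a region exactly when a noise run longer than gap_threshold is met.
import Mathlib
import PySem

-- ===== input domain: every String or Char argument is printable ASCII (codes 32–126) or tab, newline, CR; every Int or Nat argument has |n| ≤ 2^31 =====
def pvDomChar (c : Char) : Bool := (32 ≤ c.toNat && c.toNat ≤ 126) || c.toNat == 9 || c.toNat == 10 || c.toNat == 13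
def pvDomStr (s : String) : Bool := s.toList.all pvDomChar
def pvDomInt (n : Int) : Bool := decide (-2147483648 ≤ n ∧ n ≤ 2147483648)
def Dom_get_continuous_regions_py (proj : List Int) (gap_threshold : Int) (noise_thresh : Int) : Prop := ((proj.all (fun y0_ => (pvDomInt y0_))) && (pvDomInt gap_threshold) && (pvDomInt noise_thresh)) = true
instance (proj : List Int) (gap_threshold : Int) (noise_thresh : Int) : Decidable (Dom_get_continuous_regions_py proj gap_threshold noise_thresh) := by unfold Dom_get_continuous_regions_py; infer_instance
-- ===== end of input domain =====

-- B replaces A's flat per-element state machine with a two-pass decomposition (collapse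
-- into maximal signal/noise runs, then walk the runs); same O(n) cost, objective: alternative.

-- ===== PORT A =====
-- The for-loop of A, as structural recursion over proj carrying (regions, start, gap_count).
def pvALoop (gap_threshold noise_thresh : Int) :
    List Int → Int → List (Int × Int) → Option Int → Int →
    (List (Int × Int) × Option Int × Int)
  | [], _, regions, start, gap => (regions, start, gap)
  | v :: rest, i, regions, start, gap =>
    if v > noise_thresh then
      pvALoop gap_threshold noise_thresh rest (i + 1) regions
        (match start with | none => some i | some s => some s) 0
    else
      match start with
      | none => pvALoop gap_threshold noise_thresh rest (i + 1) regions none gap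
      | some s =>
        if gap + 1 > gap_threshold then
          pvALoop gap_threshold noise_thresh rest (i + 1)
            (regions ++ [(s, i - (gap + 1))]) none 0
        else
          pvALoop gap_threshold noise_thresh rest (i + 1) regions (some s) (gap + 1)

def get_continuous_regions_py (proj : List Int) (gap_threshold : Int) (noise_thresh : Int) : List (Int × Int) :=
  match pvALoop gap_threshold noise_thresh proj 0 [] none 0 with
  | (regions, some s, _) => regions ++ [(s, (proj.length : Int))]
  | (regions, none, _) => regions

-- ===== PORT B =====
-- B's inner while loop: length of the maximal prefix whose signal status equals sig,
-- together with the remainder of the list.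
def pvTakeRun (noise_thresh : Int) (sig : Bool) : List Int → Int × List Int
  | [] => (0, [])
  | v :: rest =>
    if decide (v > noise_thresh) = sig then
      ((pvTakeRun noise_thresh sig rest).1 + 1, (pvTakeRun noise_thresh sig rest).2)
    else (0, v :: rest)

-- needed by pvRunsLoop's decreasing_by
lemma pvTakeRun_len (noise_thresh : Int) (sig : Bool) :
    ∀ l : List Int, (pvTakeRun noise_thresh sig l).2.length ≤ l.length := by
  intro l
  induction l with
  | nil => simp [pvTakeRun]
  | cons v rest ih =>
    by_cases h : decide (v > noise_thresh) = sig
    · simp only [pvTakeRun, if_pos h]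
      exact Nat.le_succ_of_le ih
    · simp [pvTakeRun, if_neg h]

-- B's outer while loop of pass 1: the list of maximal runs (is_signal, run_length).
def pvRunsLoop (noise_thresh : Int) : List Int → List (Bool × Int)
  | [] => []
  | v :: rest =>
    (decide (v > noise_thresh), (pvTakeRun noise_thresh (decide (v > noise_thresh)) rest).1 + 1)
      :: pvRunsLoop noise_thresh (pvTakeRun noise_thresh (decide (v > noise_thresh)) rest).2
  termination_by l => l.length
  decreasing_by
    exact Nat.lt_succ_of_le (pvTakeRun_len noise_thresh _ rest)

-- B's pass 2: walk the runs carrying (regions, start, last, i).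
def pvWalk (gap_threshold total : Int) :
    List (Bool × Int) → Int → List (Int × Int) → Option Int → Int → List (Int × Int)
  | [], _, regions, start, _ =>
    (match start with | some s => regions ++ [(s, total)] | none => regions)
  | (sig, len) :: rest, i, regions, start, last =>
    if sig then
      pvWalk gap_threshold total rest (i + len) regions
        (match start with | none => some i | some s => some s) (i + len - 1)
    else
      match start with
      | some s =>
        if len > gap_threshold then
          pvWalk gap_threshold total rest (i + len) (regions ++ [(s, last)]) none last
        else
          pvWalk gap_threshold total rest (i + len) regions (some s) last
      | none => pvWalk gap_threshold total rest (i + len) regions none last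

def get_continuous_regions_py_alt (proj : List Int) (gap_threshold : Int) (noise_thresh : Int) : List (Int × Int) :=
  pvWalk gap_threshold (proj.length : Int) (pvRunsLoop noise_thresh proj) 0 [] none 0

-- ===== PRECONDITION & SPEC =====
def Spec_get_continuous_regions_py (proj : List Int) (gap_threshold : Int) (noise_thresh : Int) (out : List (Int × Int)) : Prop := out = get_continuous_regions_py_alt proj gap_threshold noise_thresh
instance (proj : List Int) (gap_threshold : Int) (noise_thresh : Int) (out : List (Int × Int)) : Decidable (Spec_get_continuous_regions_py proj gap_threshold noise_thresh out) := by unfold Spec_get_continuous_regions_py; infer_instance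

-- ===== CLAIM (what is proved, stated in full; the proofs are below) =====
def Claim_equal_get_continuous_regions_py : Prop := ∀ (proj : List Int) (gap_threshold : Int) (noise_thresh : Int), Dom_get_continuous_regions_py proj gap_threshold noise_thresh → Spec_get_continuous_regions_py proj gap_threshold noise_thresh (get_continuous_regions_py proj gap_threshold noise_thresh)

-- ===== LEMMAS AND PROOFS =====

-- the run count is nonnegative
lemma pvTakeRun_nonneg (nt : Int) (sig : Bool) :
    ∀ l : List Int, 0 ≤ (pvTakeRun nt sig l).1 := by
  intro l
  induction l with
  | nil => simp [pvTakeRun]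
  | cons v rest ih =>
    by_cases h : decide (v > nt) = sig
    · simp only [pvTakeRun, if_pos h]; omega
    · simp [pvTakeRun, if_neg h]

-- maximality: the remainder is empty or starts with the opposite status
lemma pvTakeRun_rest (nt : Int) (sig : Bool) :
    ∀ l : List Int, (pvTakeRun nt sig l).2 = [] ∨
      ∃ v r', (pvTakeRun nt sig l).2 = v :: r' ∧ decide (v > nt) ≠ sig := by
  intro l
  induction l with
  | nil => left; simp [pvTakeRun]
  | cons v rest ih =>
    by_cases h : decide (v > nt) = sig
    · simpa only [pvTakeRun, if_pos h] using ih
    · right; exact ⟨v, rest, by simp [pvTakeRun, if_neg h], h⟩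

-- A's loop across a run of signal elements: index advances, start/gap end as (some s, 0)
lemma pvA_sigRun (gt nt : Int) :
    ∀ (l : List Int) (i : Int) (acc : List (Int × Int)) (s : Int),
      pvALoop gt nt l i acc (some s) 0 =
      pvALoop gt nt (pvTakeRun nt true l).2 (i + (pvTakeRun nt true l).1) acc (some s) 0 := by
  intro l
  induction l with
  | nil => intro i acc s; simp [pvTakeRun]
  | cons v rest ih =>
    intro i acc s
    by_cases h : decide (v > nt) = true
    · simp only [pvTakeRun, if_pos h]
      have hv : v > nt := of_decide_eq_true h
      rw [pvALoop, if_pos hv]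
      rw [ih (i + 1) acc s]
      have e1 : i + 1 + (pvTakeRun nt true rest).1 = i + ((pvTakeRun nt true rest).1 + 1) := by ring
      rw [e1]
    · simp only [pvTakeRun, if_neg h]
      simp

-- A's loop across a run of noise elements with no open region: a no-op except the index
lemma pvA_noiseRun_none (gt nt : Int) :
    ∀ (l : List Int) (i : Int) (acc : List (Int × Int)) (g : Int),
      pvALoop gt nt l i acc none g =
      pvALoop gt nt (pvTakeRun nt false l).2 (i + (pvTakeRun nt false l).1) acc none g := by
  intro l
  induction l with
  | nil => intro i acc g; simp [pvTakeRun]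
  | cons v rest ih =>
    intro i acc g
    by_cases h : decide (v > nt) = false
    · simp only [pvTakeRun, if_pos h]
      have hv : ¬ v > nt := of_decide_eq_false h
      rw [pvALoop, if_neg hv]
      rw [ih (i + 1) acc g]
      have e1 : i + 1 + (pvTakeRun nt false rest).1 = i + ((pvTakeRun nt false rest).1 + 1) := by ring
      rw [e1]
    · simp only [pvTakeRun, if_neg h]
      simp

-- A's loop across a short noise run inside an open region: gap accumulates, nothing closes
lemma pvA_noiseRun_short (gt nt : Int) :
    ∀ (l : List Int) (i : Int) (acc : List (Int × Int)) (s g : Int),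
      0 ≤ g → g + (pvTakeRun nt false l).1 ≤ gt →
      pvALoop gt nt l i acc (some s) g =
      pvALoop gt nt (pvTakeRun nt false l).2 (i + (pvTakeRun nt false l).1) acc (some s)
        (g + (pvTakeRun nt false l).1) := by
  intro l
  induction l with
  | nil => intro i acc s g _ _; simp [pvTakeRun]
  | cons v rest ih =>
    intro i acc s g hg hbound
    by_cases h : decide (v > nt) = false
    · simp only [pvTakeRun, if_pos h] at hbound ⊢
      have hv : ¬ v > nt := of_decide_eq_false h
      have hn : 0 ≤ (pvTakeRun nt false rest).1 := pvTakeRun_nonneg nt false rest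
      rw [pvALoop, if_neg hv]
      have hno : ¬ g + 1 > gt := by omega
      rw [if_neg hno]
      rw [ih (i + 1) acc s (g + 1) (by omega) (by omega)]
      have e1 : i + 1 + (pvTakeRun nt false rest).1 = i + ((pvTakeRun nt false rest).1 + 1) := by ring
      have e2 : g + 1 + (pvTakeRun nt false rest).1 = g + ((pvTakeRun nt false rest).1 + 1) := by ring
      rw [e1, e2]
    · simp only [pvTakeRun, if_neg h]
      simp

-- A's loop across a long noise run inside an open region: the region closes at end i - g - 1
lemma pvA_noiseRun_close (gt nt : Int) :
    ∀ (l : List Int) (i : Int) (acc : List (Int × Int)) (s g : Int),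
      0 < g → g ≤ gt → gt < g + (pvTakeRun nt false l).1 →
      pvALoop gt nt l i acc (some s) g =
      pvALoop gt nt (pvTakeRun nt false l).2 (i + (pvTakeRun nt false l).1)
        (acc ++ [(s, i - g - 1)]) none 0 := by
  intro l
  induction l with
  | nil => intro i acc s g h1 h2 h3; simp [pvTakeRun] at h3; omega
  | cons v rest ih =>
    intro i acc s g h1 h2 h3
    by_cases h : decide (v > nt) = false
    · simp only [pvTakeRun, if_pos h] at h3 ⊢
      have hv : ¬ v > nt := of_decide_eq_false h
      rw [pvALoop, if_neg hv]
      by_cases hc : g + 1 > gt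
      · rw [if_pos hc]
        rw [pvA_noiseRun_none gt nt rest (i + 1) (acc ++ [(s, i - (g + 1))]) 0]
        have e1 : i + 1 + (pvTakeRun nt false rest).1 = i + ((pvTakeRun nt false rest).1 + 1) := by ring
        have e2 : i - (g + 1) = i - g - 1 := by ring
        rw [e1, e2]
      · rw [if_neg hc]
        rw [ih (i + 1) acc s (g + 1) (by omega) (by omega) (by omega)]
        have e1 : i + 1 + (pvTakeRun nt false rest).1 = i + ((pvTakeRun nt false rest).1 + 1) := by ring
        have e2 : i + 1 - (g + 1) - 1 = i - g - 1 := by ring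
        rw [e1, e2]
    · simp only [pvTakeRun, if_neg h] at h3
      have := pvTakeRun_nonneg nt false rest
      simp at h3
      omega

-- the final close of A, as a function of the loop's end state
def pvAClose (total : Int) : List (Int × Int) × Option Int × Int → List (Int × Int)
  | (regions, some s, _) => regions ++ [(s, total)]
  | (regions, none, _) => regions

-- Main simulation lemma: A's state machine, run to the end and closed, equals B's walk
-- over the runs of l, for any reachable mid-state.
lemma pvMain (gt nt total : Int) :
    ∀ (n : Nat) (l : List Int), l.length ≤ n →
    ∀ (i : Int) (acc : List (Int × Int)) (start : Option Int) (g last : Int),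
      (start = none → g = 0) →
      (∀ v r', l = v :: r' → ¬ v > nt → ∀ s, start = some s → g = 0 ∧ last = i - 1) →
      pvAClose total (pvALoop gt nt l i acc start g) =
      pvWalk gt total (pvRunsLoop nt l) i acc start last := by
  intro n
  induction n with
  | zero =>
    intro l hl i acc start g last h1 h3
    have hnil : l = [] := by
      cases l with
      | nil => rfl
      | cons a b => simp at hl
    subst hnil
    cases start with
    | none => simp [pvALoop, pvRunsLoop, pvWalk, pvAClose]
    | some s => simp [pvALoop, pvRunsLoop, pvWalk, pvAClose]
  | succ m ih =>
    intro l hl i acc start g last h1 h3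
    cases l with
    | nil =>
      cases start with
      | none => simp [pvALoop, pvRunsLoop, pvWalk, pvAClose]
      | some s => simp [pvALoop, pvRunsLoop, pvWalk, pvAClose]
    | cons v rest =>
      have hrest : rest.length ≤ m := by simpa using hl
      rw [pvRunsLoop]
      cases start with
      | none =>
        have hg0 : g = 0 := h1 rfl
        subst hg0
        by_cases hv : v > nt
        · -- signal run opening a region at i
          have hd : decide (v > nt) = true := decide_eq_true hv
          have hrem : (pvTakeRun nt true rest).2.length ≤ m :=
            le_trans (pvTakeRun_len nt true rest) hrest
          rw [pvALoop, if_pos hv]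
          rw [hd, pvWalk, if_pos rfl]
          rw [pvA_sigRun gt nt rest (i + 1) acc i]
          have e1 : i + 1 + (pvTakeRun nt true rest).1 = i + ((pvTakeRun nt true rest).1 + 1) := by ring
          rw [e1]
          exact ih (pvTakeRun nt true rest).2 hrem
            (i + ((pvTakeRun nt true rest).1 + 1)) acc (some i) 0
            (i + ((pvTakeRun nt true rest).1 + 1) - 1)
            (by intro h; cases h) (by intro v' r' _ _ s' _; exact ⟨rfl, rfl⟩)
        · -- noise run with no open region: a no-op
          have hd : decide (v > nt) = false := decide_eq_false hv
          have hrem : (pvTakeRun nt false rest).2.length ≤ m :=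
            le_trans (pvTakeRun_len nt false rest) hrest
          rw [pvALoop, if_neg hv]
          rw [hd, pvWalk, if_neg (by simp)]
          rw [pvA_noiseRun_none gt nt rest (i + 1) acc 0]
          have e1 : i + 1 + (pvTakeRun nt false rest).1 = i + ((pvTakeRun nt false rest).1 + 1) := by ring
          rw [e1]
          exact ih (pvTakeRun nt false rest).2 hrem
            (i + ((pvTakeRun nt false rest).1 + 1)) acc none 0 last
            (fun _ => rfl) (by intro v' r' _ _ s' hs; cases hs)
      | some s =>
        by_cases hv : v > nt
        · -- signal run inside an open region
          have hd : decide (v > nt) = true := decide_eq_true hv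
          have hrem : (pvTakeRun nt true rest).2.length ≤ m :=
            le_trans (pvTakeRun_len nt true rest) hrest
          rw [pvALoop, if_pos hv]
          rw [hd, pvWalk, if_pos rfl]
          rw [pvA_sigRun gt nt rest (i + 1) acc s]
          have e1 : i + 1 + (pvTakeRun nt true rest).1 = i + ((pvTakeRun nt true rest).1 + 1) := by ring
          rw [e1]
          exact ih (pvTakeRun nt true rest).2 hrem
            (i + ((pvTakeRun nt true rest).1 + 1)) acc (some s) 0
            (i + ((pvTakeRun nt true rest).1 + 1) - 1)
            (by intro h; cases h) (by intro v' r' _ _ s' _; exact ⟨rfl, rfl⟩)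
        · -- noise run inside an open region
          have hd : decide (v > nt) = false := decide_eq_false hv
          have hrem : (pvTakeRun nt false rest).2.length ≤ m :=
            le_trans (pvTakeRun_len nt false rest) hrest
          have hnn : 0 ≤ (pvTakeRun nt false rest).1 := pvTakeRun_nonneg nt false rest
          obtain ⟨hg0, hlast⟩ := h3 v rest rfl hv s rfl
          subst hg0
          subst hlast
          rw [pvALoop, if_neg hv]
          rw [hd]
          simp only [pvWalk, eq_false (by simp : ¬ (false = true)), if_false]
          -- the remainder of the run starts with a signal element (or is empty),
          -- so the open-region hypothesis of the inductive step is vacuous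
          have hmax3 : ∀ (i' : Int) (st : Option Int) (g' last' : Int), ∀ v' r',
              (pvTakeRun nt false rest).2 = v' :: r' → ¬ v' > nt → ∀ s'', st = some s'' →
              g' = 0 ∧ last' = i' - 1 := by
            intro i' st g' last' v' r' hr hv' s'' hst
            rcases pvTakeRun_rest nt false rest with h0 | ⟨w, w', hw, hwne⟩
            · rw [h0] at hr; cases hr
            · rw [hw] at hr
              injection hr with e1 e2
              subst e1
              exact absurd hwne (by simp [decide_eq_false hv'])
          by_cases hlen : (pvTakeRun nt false rest).1 + 1 > gt
          · -- long run: the region closes with end i - 1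
            rw [if_pos hlen]
            have hgoal :
                pvAClose total
                  (if 0 + 1 > gt then
                    pvALoop gt nt rest (i + 1) (acc ++ [(s, i - (0 + 1))]) none 0
                   else pvALoop gt nt rest (i + 1) acc (some s) (0 + 1)) =
                pvAClose total
                  (pvALoop gt nt (pvTakeRun nt false rest).2
                    (i + ((pvTakeRun nt false rest).1 + 1)) (acc ++ [(s, i - 1)]) none 0) := by
              by_cases hc : (0 : Int) + 1 > gt
              · rw [if_pos hc]
                rw [pvA_noiseRun_none gt nt rest (i + 1) (acc ++ [(s, i - (0 + 1))]) 0]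
                have e1 : i + 1 + (pvTakeRun nt false rest).1 = i + ((pvTakeRun nt false rest).1 + 1) := by ring
                have e2 : i - ((0 : Int) + 1) = i - 1 := by ring
                rw [e1, e2]
              · rw [if_neg hc]
                rw [pvA_noiseRun_close gt nt rest (i + 1) acc s (0 + 1)
                  (by omega) (by omega) (by omega)]
                have e1 : i + 1 + (pvTakeRun nt false rest).1 = i + ((pvTakeRun nt false rest).1 + 1) := by ring
                have e2 : i + 1 - ((0 : Int) + 1) - 1 = i - 1 := by ring
                rw [e1, e2]
            rw [hgoal]
            exact ih (pvTakeRun nt false rest).2 hrem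
              (i + ((pvTakeRun nt false rest).1 + 1)) (acc ++ [(s, i - 1)]) none 0 (i - 1)
              (fun _ => rfl) (by intro v' r' _ _ s'' hs; cases hs)
          · -- short run: the gap accumulates, the region stays open
            rw [if_neg hlen]
            have hno : ¬ (0 : Int) + 1 > gt := by omega
            rw [if_neg hno]
            rw [pvA_noiseRun_short gt nt rest (i + 1) acc s (0 + 1) (by omega) (by omega)]
            have e1 : i + 1 + (pvTakeRun nt false rest).1 = i + ((pvTakeRun nt false rest).1 + 1) := by ring
            rw [e1]
            exact ih (pvTakeRun nt false rest).2 hrem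
              (i + ((pvTakeRun nt false rest).1 + 1)) acc (some s)
              (0 + 1 + (pvTakeRun nt false rest).1) (i - 1)
              (by intro h; cases h)
              (hmax3 (i + ((pvTakeRun nt false rest).1 + 1)) (some s) _ (i - 1))

-- ===== VERDICT (by name: the statement is the Claim_ definition above) =====
theorem get_continuous_regions_py_spec : Claim_equal_get_continuous_regions_py := by
  unfold Claim_equal_get_continuous_regions_py
  intro proj gt nt _
  unfold Spec_get_continuous_regions_py
  unfold get_continuous_regions_py get_continuous_regions_py_alt
  have := pvMain gt nt (proj.length : Int) proj.length proj (le_refl _)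
    0 [] none 0 0 (fun _ => rfl) (by intro v r' _ _ s hs; cases hs)
  rw [← this]
  rfl
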